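-- pv_equiv track=rewrite | github.com/MinTreesLearn/ML | Codeforces Submissions/1305/E/96864139.py | gen_sequence
-- ===== SOURCE A (Python) =====
-- def gen_sequence(size, balance):
--     result = []
--     for i in range(1, size + 1):
--         triple_count = (i - 1) >> 1
--         if triple_count <= balance:
--             result.append(i)
--             balance -= triple_count
--         else:
--             break
--     if len(result) == size and balance > 0:
--         return [-1]
--     if balance > 0:
--         result.append(2 * (result[-1] - balance) + 1)
--     delta = result[-1] + 1
--     while len(result) < size:
--         value = result[-1] + delta
--         if value % 2 == 0:
--             value += 1
--         result.append(value)
--     return result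
-- ===== SOURCE B (Python) =====
-- def gen_sequence(size, balance):
--     # Phase 1 replaced by a closed form: the greedy loop appends i exactly while
--     # C(i) = (i-1)**2//4 <= balance, so binary-search the largest such k in [0, size].
--     def cost(k):
--         return (k - 1) * (k - 1) // 4
--     lo, hi = 0, size
--     while lo < hi:
--         mid = (lo + hi + 1) // 2
--         if cost(mid) <= balance:
--             lo = mid
--         else:
--             hi = mid - 1
--     k = lo
--     remaining = balance - cost(k)
--     if k == size and remaining > 0:
--         return [-1]
--     result = list(range(1, k + 1))
--     if remaining > 0:
--         result.append(2 * (k - remaining) + 1)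
--     last = result[-1]
--     delta = last + 1
--     # Phase 3 replaced by a closed form: the padded values are an arithmetic
--     # progression starting at 2*last+1 with step delta + delta % 2.
--     first = last + delta
--     if first % 2 == 0:
--         first += 1
--     step = delta + delta % 2
--     n = size - len(result)
--     result.extend(range(first, first + step * n, step))
--     return result
-- ===== Notes on version B (the rewrite author's own statement) =====
-- stated objective: faster
-- what changed: A's greedy element-by-element loop is replaced by a binary search for the breakpoint k (the largest k with (k-1)**2//4 <= balance) followed by a bulk list(range(1,k+1)), and A's append-one-at-a-time padding while-loop is replaced by a single arithmetic-progression range; Pre_ excludes only the inputs where A raises IndexError (size < 0, balance < 0, or size = 0 with balance <= 0).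
import Mathlib
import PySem

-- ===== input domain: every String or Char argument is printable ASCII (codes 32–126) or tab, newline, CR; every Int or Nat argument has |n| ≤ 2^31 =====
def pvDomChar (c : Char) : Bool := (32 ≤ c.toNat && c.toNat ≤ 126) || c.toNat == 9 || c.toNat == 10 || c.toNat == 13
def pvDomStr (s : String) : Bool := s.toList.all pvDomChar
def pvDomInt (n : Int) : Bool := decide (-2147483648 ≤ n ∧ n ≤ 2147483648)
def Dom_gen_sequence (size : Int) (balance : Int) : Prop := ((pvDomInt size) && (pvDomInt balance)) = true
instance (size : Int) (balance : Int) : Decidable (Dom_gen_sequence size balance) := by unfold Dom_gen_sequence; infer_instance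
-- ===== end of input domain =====

-- B replaces A's greedy first loop by a binary search for the breakpoint and A's padding
-- loop by one arithmetic-progression range (objective: faster by a constant factor).

-- ===== PORT A =====
-- the for-loop with break over range(1, size+1); state = (result, balance)
def genLoopA : List Int → List Int → Int → List Int × Int
  | [], res, bal => (res, bal)
  | i :: rest, res, bal =>
    if (i - 1) >>> (1 : Nat) ≤ bal then genLoopA rest (res ++ [i]) (bal - ((i - 1) >>> (1 : Nat)))
    else (res, bal)

-- the `while len(result) < size` padding loop; terminates because each step appends one element
def padA (size : Int) (res : List Int) (delta : Int) : List Int :=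
  if h : (res.length : Int) < size then
    padA size
      (res ++ [if PySem.Int.mod (PySem.List.pyGetD res (-1) 0 + delta) 2 = 0
               then PySem.List.pyGetD res (-1) 0 + delta + 1
               else PySem.List.pyGetD res (-1) 0 + delta]) delta
  else res
termination_by (size - (res.length : Int)).toNat
decreasing_by simp only [List.length_append, List.length_cons, List.length_nil]; omega

def gen_sequence (size : Int) (balance : Int) : List Int :=
  let p := genLoopA (PySem.List.pyRange 1 (size + 1) 1) [] balance
  if (p.1.length : Int) = size ∧ 0 < p.2 then [-1]
  else
    let result := if 0 < p.2 then p.1 ++ [2 * (PySem.List.pyGetD p.1 (-1) 0 - p.2) + 1] else p.1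
    padA size result (PySem.List.pyGetD result (-1) 0 + 1)

-- ===== PORT B =====
def costB (k : Int) : Int := PySem.Int.floordiv ((k - 1) * (k - 1)) 4

-- the binary-search while loop of Source B
def bsearchB (balance lo hi : Int) : Int :=
  if h : lo < hi then
    if costB (PySem.Int.floordiv (lo + hi + 1) 2) ≤ balance then
      bsearchB balance (PySem.Int.floordiv (lo + hi + 1) 2) hi
    else
      bsearchB balance lo (PySem.Int.floordiv (lo + hi + 1) 2 - 1)
  else lo
termination_by (hi - lo).toNat
decreasing_by
  all_goals
    have hd : PySem.Int.floordiv (lo + hi + 1) 2 = (lo + hi + 1) / 2 :=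
      PySem.Int.floordiv_eq_ediv_of_pos (by norm_num)
    omega

def gen_sequence_alt (size : Int) (balance : Int) : List Int :=
  let k := bsearchB balance 0 size
  let remaining := balance - costB k
  if k = size ∧ 0 < remaining then [-1]
  else
    let result := if 0 < remaining then PySem.List.pyRange 1 (k + 1) 1 ++ [2 * (k - remaining) + 1]
                  else PySem.List.pyRange 1 (k + 1) 1
    let last := PySem.List.pyGetD result (-1) 0
    let delta := last + 1
    let first := if PySem.Int.mod (last + delta) 2 = 0 then last + delta + 1 else last + delta
    let step := delta + PySem.Int.mod delta 2
    result ++ PySem.List.pyRange first (first + step * (size - (result.length : Int))) step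

-- ===== PRECONDITION & SPEC =====
-- Pre_ excludes exactly the inputs on which A raises IndexError (result stays empty and
-- result[-1] is read): size < 0, or balance < 0, or size = 0 with balance ≤ 0.
def Pre_gen_sequence (size : Int) (balance : Int) : Prop :=
  (1 ≤ size ∧ 0 ≤ balance) ∨ (size = 0 ∧ 0 < balance)
instance (size : Int) (balance : Int) : Decidable (Pre_gen_sequence size balance) := by
  unfold Pre_gen_sequence; infer_instance
def pvWitness_gen_sequence : Int × Int := (5, 3)

def Spec_gen_sequence (size : Int) (balance : Int) (out : List Int) : Prop := out = gen_sequence_alt size balance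
instance (size : Int) (balance : Int) (out : List Int) : Decidable (Spec_gen_sequence size balance out) := by unfold Spec_gen_sequence; infer_instance

-- ===== CLAIM (what is proved, stated in full; the proofs are below) =====
def Claim_equal_gen_sequence : Prop := ∀ (size : Int) (balance : Int), Dom_gen_sequence size balance → Pre_gen_sequence size balance → Spec_gen_sequence size balance (gen_sequence size balance)

-- ===== LEMMAS AND PROOFS =====

lemma shiftR1 (a : Int) : a >>> (1 : Nat) = a / 2 := by
  rw [Int.shiftRight_eq_div_pow]; norm_num

lemma costB_zero : costB 0 = 0 := by decide
lemma costB_one : costB 1 = 0 := by decide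

lemma costB_succ (j : Int) : costB (j + 1) = costB j + j / 2 := by
  unfold costB
  rw [PySem.Int.floordiv_eq_ediv_of_pos (by norm_num), PySem.Int.floordiv_eq_ediv_of_pos (by norm_num)]
  rcases Int.even_or_odd j with ⟨q, hq⟩ | ⟨q, hq⟩
  · subst hq
    have e1 : (q + q + 1 - 1) * (q + q + 1 - 1) = 4 * (q * q) := by ring
    have e2 : (q + q - 1) * (q + q - 1) = 1 + 4 * (q * q - q) := by ring
    have e3 : q + q = 2 * q := by ring
    rw [e1, e2, e3, Int.mul_ediv_cancel_left _ (by norm_num),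
        Int.mul_ediv_cancel_left _ (by norm_num), Int.add_mul_ediv_left _ _ (by norm_num)]
    norm_num
  · subst hq
    have e1 : (2 * q + 1 + 1 - 1) * (2 * q + 1 + 1 - 1) = 1 + 4 * (q * q + q) := by ring
    have e2 : (2 * q + 1 - 1) * (2 * q + 1 - 1) = 4 * (q * q) := by ring
    have e3 : 2 * q + 1 = 1 + 2 * q := by ring
    rw [e1, e2, e3, Int.add_mul_ediv_left _ _ (show (4:Int) ≠ 0 by norm_num),
        Int.mul_ediv_cancel_left _ (by norm_num), Int.add_mul_ediv_left _ _ (show (2:Int) ≠ 0 by norm_num)]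
    norm_num

lemma costB_le (a b : Int) (ha : 0 ≤ a) (hab : a ≤ b) : costB a ≤ costB b := by
  obtain ⟨n, rfl⟩ : ∃ n : Nat, b = a + n := ⟨(b - a).toNat, by omega⟩
  clear hab
  induction n with
  | zero => simp
  | succ m ih =>
    have h2 := costB_succ (a + m)
    have h3 : 0 ≤ (a + (m : Int)) / 2 := Int.ediv_nonneg (by omega) (by norm_num)
    have e : a + ((m : Int) + 1) = a + (m : Int) + 1 := by ring
    push_cast
    rw [e]
    omega


lemma genLoopA_spec : ∀ (n : Nat) (a b bal : Int) (acc : List Int),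
    (b - a).toNat ≤ n → 1 ≤ a → a ≤ b → 0 ≤ bal →
    ∃ k, a - 1 ≤ k ∧ k ≤ b - 1 ∧
      genLoopA (PySem.List.pyRange a b 1) acc bal
        = (acc ++ PySem.List.pyRange a (k + 1) 1, bal - (costB k - costB (a - 1))) ∧
      0 ≤ bal - (costB k - costB (a - 1)) ∧
      (k = b - 1 ∨ bal < costB (k + 1) - costB (a - 1)) := by
  intro n
  induction n with
  | zero =>
    intro a b bal acc hn ha hab hbal
    have hba : b = a := by omega
    refine ⟨a - 1, by omega, by omega, ?_, by omega, Or.inl (by omega)⟩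
    rw [show a - 1 + 1 = a by ring, hba, PySem.List.pyRange_one_eq_nil (le_refl a)]
    simp [genLoopA]
  | succ m ih =>
    intro a b bal acc hn ha hab hbal
    by_cases hlt : a < b
    · rw [PySem.List.pyRange_one_cons hlt]
      have htc2 : (a - 1) >>> (1 : Nat) = (a - 1) / 2 := shiftR1 _
      have htcnn : 0 ≤ (a - 1) / 2 := Int.ediv_nonneg (by omega) (by norm_num)
      have hcs : costB a = costB (a - 1) + (a - 1) / 2 := by
        have h := costB_succ (a - 1); rw [show a - 1 + 1 = a by ring] at h; exact h
      by_cases hcond : (a - 1) >>> (1 : Nat) ≤ bal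
      · rw [show genLoopA (a :: PySem.List.pyRange (a + 1) b 1) acc bal
              = genLoopA (PySem.List.pyRange (a + 1) b 1) (acc ++ [a]) (bal - ((a - 1) >>> (1 : Nat)))
            from by simp [genLoopA, hcond]]
        obtain ⟨k, hk1, hk2, hrun, hnn, hdisj⟩ :=
          ih (a + 1) b (bal - ((a - 1) >>> (1 : Nat))) (acc ++ [a]) (by omega) (by omega)
            (by omega) (by omega)
        rw [show a + 1 - 1 = a by ring] at hrun hnn hdisj
        have hcons : PySem.List.pyRange a (k + 1) 1 = a :: PySem.List.pyRange (a + 1) (k + 1) 1 :=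
          PySem.List.pyRange_one_cons (by omega)
        refine ⟨k, by omega, hk2, ?_, by omega, ?_⟩
        · rw [hrun, hcons]
          simp only [List.append_assoc, List.singleton_append, Prod.mk.injEq]
          exact ⟨by trivial, by omega⟩
        · rcases hdisj with h | h
          · exact Or.inl h
          · exact Or.inr (by omega)
      · rw [show genLoopA (a :: PySem.List.pyRange (a + 1) b 1) acc bal = (acc, bal)
            from by simp [genLoopA, hcond]]
        refine ⟨a - 1, by omega, by omega, ?_, by omega, Or.inr ?_⟩
        · rw [show a - 1 + 1 = a by ring, PySem.List.pyRange_one_eq_nil (le_refl a)]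
          simp
        · rw [show a - 1 + 1 = a by ring]
          omega
    · have hba : b = a := by omega
      refine ⟨a - 1, by omega, by omega, ?_, by omega, Or.inl (by omega)⟩
      rw [show a - 1 + 1 = a by ring, hba, PySem.List.pyRange_one_eq_nil (le_refl a)]
      simp [genLoopA]

lemma bsearchB_spec : ∀ (n : Nat) (bal lo hi top : Int),
    (hi - lo).toNat ≤ n → 0 ≤ lo → lo ≤ hi → costB lo ≤ bal → (hi = top ∨ bal < costB (hi + 1)) →
    lo ≤ bsearchB bal lo hi ∧ bsearchB bal lo hi ≤ hi ∧ costB (bsearchB bal lo hi) ≤ bal ∧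
      (bsearchB bal lo hi = top ∨ bal < costB (bsearchB bal lo hi + 1)) := by
  intro n
  induction n with
  | zero =>
    intro bal lo hi top hn h0 hlh hc hd
    have he : hi = lo := by omega
    rw [bsearchB, dif_neg (by omega)]
    exact ⟨le_refl lo, by omega, hc, by rw [he] at hd; exact hd⟩
  | succ m ih =>
    intro bal lo hi top hn h0 hlh hc hd
    by_cases hlt : lo < hi
    · have hmid : PySem.Int.floordiv (lo + hi + 1) 2 = (lo + hi + 1) / 2 :=
        PySem.Int.floordiv_eq_ediv_of_pos (by norm_num)
      by_cases hcm : costB (PySem.Int.floordiv (lo + hi + 1) 2) ≤ bal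
      · rw [bsearchB, dif_pos hlt, if_pos hcm]
        have h := ih bal (PySem.Int.floordiv (lo + hi + 1) 2) hi top (by omega) (by omega)
          (by omega) hcm hd
        exact ⟨by omega, h.2.1, h.2.2.1, h.2.2.2⟩
      · rw [bsearchB, dif_pos hlt, if_neg hcm]
        have h := ih bal lo (PySem.Int.floordiv (lo + hi + 1) 2 - 1) top (by omega) h0
          (by omega) hc (Or.inr (by rw [show PySem.Int.floordiv (lo + hi + 1) 2 - 1 + 1
              = PySem.Int.floordiv (lo + hi + 1) 2 by ring]; omega))
        exact ⟨h.1, by omega, h.2.2.1, h.2.2.2⟩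
    · have he : hi = lo := by omega
      rw [bsearchB, dif_neg (by omega)]
      exact ⟨le_refl lo, by omega, hc, by rw [he] at hd; exact hd⟩

lemma breakpoint_unique (top bal k1 k2 : Int) (h01 : 0 ≤ k1) (h02 : 0 ≤ k2)
    (hs1 : k1 ≤ top) (hs2 : k2 ≤ top) (hc1 : costB k1 ≤ bal) (hc2 : costB k2 ≤ bal)
    (hd1 : k1 = top ∨ bal < costB (k1 + 1)) (hd2 : k2 = top ∨ bal < costB (k2 + 1)) : k1 = k2 := by
  rcases lt_trichotomy k1 k2 with h | h | h
  · rcases hd1 with h1 | h1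
    · omega
    · have := costB_le (k1 + 1) k2 (by omega) (by omega); omega
  · exact h
  · rcases hd2 with h2 | h2
    · omega
    · have := costB_le (k2 + 1) k1 (by omega) (by omega); omega

lemma ap_cons (v s : Int) (n : Nat) :
    (List.range (n + 1)).map (fun (k : Nat) => v + s * (k : Int))
      = v :: (List.range n).map (fun (j : Nat) => v + s * ((j : Int) + 1)) := by
  rw [List.range_succ_eq_map, List.map_cons, List.map_map]
  norm_num

lemma ap_shift (v s : Int) (n : Nat) :
    (List.range (n + 1)).map (fun (j : Nat) => v + s * ((j : Int) + 1))
      = (v + s) :: (List.range n).map (fun (j : Nat) => (v + s) + s * ((j : Int) + 1)) := by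
  rw [List.range_succ_eq_map, List.map_cons, List.map_map]
  norm_num
  intro a _
  ring

lemma padA_ap (size delta : Int) : ∀ (n : Nat) (res : List Int) (v : Int),
    (size - ((res ++ [v]).length : Int)).toNat = n → PySem.Int.mod v 2 = 1 →
    padA size (res ++ [v]) delta
      = (res ++ [v]) ++ (List.range n).map
          (fun (j : Nat) => v + (delta + PySem.Int.mod delta 2) * ((j : Int) + 1)) := by
  intro n
  induction n with
  | zero =>
    intro res v hn hv
    rw [padA, dif_neg (by simp only [List.length_append, List.length_cons, List.length_nil] at hn ⊢; omega)]
    simp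
  | succ m ih =>
    intro res v hn hv
    have hlen : (((res ++ [v]).length : Int)) < size := by
      simp only [List.length_append, List.length_cons, List.length_nil] at hn ⊢; omega
    rw [padA, dif_pos hlen, PySem.List.pyGetD_neg_one_append_singleton]
    rw [PySem.Int.mod_eq_emod_of_pos (by norm_num : (0:Int) < 2)] at hv
    have hmd : PySem.Int.mod delta 2 = delta % 2 := PySem.Int.mod_eq_emod_of_pos (by norm_num)
    have hval : (if PySem.Int.mod (v + delta) 2 = 0 then v + delta + 1 else v + delta)
        = v + (delta + PySem.Int.mod delta 2) := by
      rw [PySem.Int.mod_eq_emod_of_pos (by norm_num : (0:Int) < 2), hmd]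
      rcases Int.emod_two_eq_zero_or_one delta with h | h
      · rw [if_neg (by omega)]; omega
      · rw [if_pos (by omega)]; omega
    rw [hval]
    have hodd : PySem.Int.mod (v + (delta + PySem.Int.mod delta 2)) 2 = 1 := by
      rw [PySem.Int.mod_eq_emod_of_pos (by norm_num : (0:Int) < 2), hmd]
      rcases Int.emod_two_eq_zero_or_one delta with h | h <;> omega
    have happ := ih (res ++ [v]) (v + (delta + PySem.Int.mod delta 2))
      (by simp only [List.length_append, List.length_cons, List.length_nil] at hn ⊢; omega) hodd
    rw [happ, ap_shift]
    simp

lemma pad_eq_range (size L : Int) (res : List Int)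
    (hres : PySem.List.pyGetD res (-1) 0 = L) (hL : 1 ≤ L) :
    padA size res (L + 1)
      = res ++ PySem.List.pyRange (L + (L + 1))
          (L + (L + 1) + ((L + 1) + PySem.Int.mod (L + 1) 2) * (size - (res.length : Int)))
          ((L + 1) + PySem.Int.mod (L + 1) 2) := by
  have hmd : PySem.Int.mod (L + 1) 2 = (L + 1) % 2 := PySem.Int.mod_eq_emod_of_pos (by norm_num)
  have hs2 : 2 ≤ (L + 1) + PySem.Int.mod (L + 1) 2 := by
    rcases Int.emod_two_eq_zero_or_one (L + 1) with h | h <;> omega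
  by_cases hfit : (res.length : Int) < size
  · have hm1 : 1 ≤ size - (res.length : Int) := by omega
    rw [padA, dif_pos hfit, hres]
    rw [if_neg (show ¬ PySem.Int.mod (L + (L + 1)) 2 = 0 by
      rw [PySem.Int.mod_eq_emod_of_pos (by norm_num : (0:Int) < 2)]; omega)]
    have hap := padA_ap size (L + 1) ((size - ((res ++ [L + (L + 1)]).length : Int)).toNat)
      res (L + (L + 1)) rfl
      (by rw [PySem.Int.mod_eq_emod_of_pos (by norm_num : (0:Int) < 2)]; omega)
    rw [hap]
    have hlt : L + (L + 1)
        < L + (L + 1) + ((L + 1) + PySem.Int.mod (L + 1) 2) * (size - (res.length : Int)) := by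
      have := mul_pos (show (0:Int) < (L + 1) + PySem.Int.mod (L + 1) 2 by omega)
        (show (0:Int) < size - (res.length : Int) by omega)
      linarith
    rw [PySem.List.pyRange_of_pos _ _ (by omega), if_pos hlt]
    have hediv : (L + (L + 1) + ((L + 1) + PySem.Int.mod (L + 1) 2) * (size - (res.length : Int))
          - (L + (L + 1)) + ((L + 1) + PySem.Int.mod (L + 1) 2) - 1)
          / ((L + 1) + PySem.Int.mod (L + 1) 2) = size - (res.length : Int) := by
      rw [show L + (L + 1) + ((L + 1) + PySem.Int.mod (L + 1) 2) * (size - (res.length : Int))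
          - (L + (L + 1)) + ((L + 1) + PySem.Int.mod (L + 1) 2) - 1
          = ((L + 1) + PySem.Int.mod (L + 1) 2 - 1)
            + ((L + 1) + PySem.Int.mod (L + 1) 2) * (size - (res.length : Int)) by ring]
      rw [Int.add_mul_ediv_left _ _ (show (L + 1) + PySem.Int.mod (L + 1) 2 ≠ 0 by omega)]
      rw [Int.ediv_eq_zero_of_lt (by omega) (by omega)]
      ring
    rw [hediv]
    rw [show (size - (res.length : Int)).toNat
        = (size - ((res ++ [L + (L + 1)]).length : Int)).toNat + 1 by
      simp only [List.length_append, List.length_cons, List.length_nil]; omega]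
    rw [ap_cons]
    simp
  · rw [padA, dif_neg hfit]
    have hnp : ((L + 1) + PySem.Int.mod (L + 1) 2) * (size - (res.length : Int)) ≤ 0 := by
      have := mul_le_mul_of_nonneg_left (show size - (res.length : Int) ≤ 0 by omega)
        (show (0:Int) ≤ (L + 1) + PySem.Int.mod (L + 1) 2 by omega)
      simpa using this
    rw [PySem.List.pyRange_of_pos _ _ (by omega : (0:Int) < (L + 1) + PySem.Int.mod (L + 1) 2)]
    rw [if_neg (by omega)]
    simp

lemma main_zero (balance : Int) (hb : 0 < balance) :
    gen_sequence 0 balance = gen_sequence_alt 0 balance := by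
  simp only [gen_sequence, gen_sequence_alt]
  rw [show (0:Int) + 1 = 1 by norm_num, PySem.List.pyRange_one_eq_nil (le_refl (1:Int))]
  rw [show bsearchB balance 0 0 = 0 from by rw [bsearchB]; exact dif_neg (lt_irrefl 0)]
  simp [genLoopA, costB_zero, hb]

lemma main_pos (size balance : Int) (hs : 1 ≤ size) (hb : 0 ≤ balance) :
    gen_sequence size balance = gen_sequence_alt size balance := by
  obtain ⟨k, hk0, hk1, hrun, hnn, hdisj⟩ :=
    genLoopA_spec (size + 1 - 1).toNat 1 (size + 1) balance [] (by omega) (by omega) (by omega) hb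
  rw [show (1:Int) - 1 = 0 by norm_num, costB_zero] at hrun hnn hdisj
  simp only [List.nil_append, sub_zero] at hrun hnn hdisj
  rw [show size + 1 - 1 = size by ring] at hk1 hdisj
  obtain ⟨hb0, hb1, hb2, hb3⟩ := bsearchB_spec size.toNat balance 0 size size (by omega)
    (le_refl 0) (by omega) (by rw [costB_zero]; exact hb) (Or.inl rfl)
  have hck : costB k ≤ balance := by omega
  have hkk : bsearchB balance 0 size = k :=
    breakpoint_unique size balance _ k hb0 (by omega) hb1 (by omega) hb2 hck hb3 hdisj
  simp only [gen_sequence, gen_sequence_alt]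
  rw [hrun, hkk]
  dsimp only
  have hlen : ((PySem.List.pyRange 1 (k + 1) 1).length : Int) = k := by
    rw [PySem.List.length_pyRange_one]; omega
  by_cases hterm : k = size ∧ 0 < balance - costB k
  · rw [if_pos ⟨by rw [hlen]; exact hterm.1, hterm.2⟩, if_pos hterm]
  · have hK1 : 1 ≤ k := by
      rcases hdisj with h | h
      · omega
      · by_contra hlt
        have hk00 : k = 0 := by omega
        rw [hk00, show (0:Int) + 1 = 1 by norm_num, costB_one] at h
        omega
    rw [if_neg (fun hh => hterm ⟨by rw [hlen] at hh; exact hh.1, hh.2⟩), if_neg hterm]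
    have hrspl : PySem.List.pyRange 1 (k + 1) 1 = PySem.List.pyRange 1 k 1 ++ [k] :=
      PySem.List.pyRange_one_succ_right (by omega)
    have hlast1 : PySem.List.pyGetD (PySem.List.pyRange 1 (k + 1) 1) (-1) 0 = k := by
      rw [hrspl, PySem.List.pyGetD_neg_one_append_singleton]
    by_cases hpos : 0 < balance - costB k
    · rw [if_pos hpos, if_pos hpos, hlast1]
      have hk_ne : k ≠ size := fun hh => hterm ⟨hh, hpos⟩
      have hrem_lt : balance - costB k < k / 2 := by
        rcases hdisj with h | h
        · exact absurd h hk_ne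
        · have := costB_succ k; omega
      have hdnn : 0 ≤ k / 2 := Int.ediv_nonneg (by omega) (by norm_num)
      have hdle : k / 2 ≤ k := by omega
      have hL1 : 1 ≤ 2 * (k - (balance - costB k)) + 1 := by omega
      have hlast2 : PySem.List.pyGetD
          (PySem.List.pyRange 1 (k + 1) 1 ++ [2 * (k - (balance - costB k)) + 1]) (-1) 0
          = 2 * (k - (balance - costB k)) + 1 :=
        PySem.List.pyGetD_neg_one_append_singleton _ _ _
      rw [hlast2]
      rw [if_neg (show ¬ PySem.Int.mod (2 * (k - (balance - costB k)) + 1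
            + (2 * (k - (balance - costB k)) + 1 + 1)) 2 = 0 by
        rw [PySem.Int.mod_eq_emod_of_pos (by norm_num : (0:Int) < 2)]; omega)]
      exact pad_eq_range size _ _ hlast2 hL1
    · rw [if_neg hpos, if_neg hpos, hlast1]
      rw [if_neg (show ¬ PySem.Int.mod (k + (k + 1)) 2 = 0 by
        rw [PySem.Int.mod_eq_emod_of_pos (by norm_num : (0:Int) < 2)]; omega)]
      exact pad_eq_range size _ _ hlast1 hK1

-- ===== VERDICT (by name: the statement is the Claim_ definition above) =====
theorem gen_sequence_spec : Claim_equal_gen_sequence := by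
  intro size balance _ hpre
  unfold Spec_gen_sequence
  rcases hpre with ⟨hs, hb⟩ | ⟨hs, hb⟩
  · exact main_pos size balance hs hb
  · subst hs; exact main_zero balance hb
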